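-- pv_equiv track=rewrite | github.com/cbl21c/Ericsson-CDR | ericsson/primitives.py | _TBCDString
-- ===== SOURCE A (Python) =====
-- def _TBCDString(contents):
--     # for all parameters which are to be interpreted as TBCD
--     # returns the address string but does not display the result
--     # Note: this is also a defined type in the ASN.1 specification
--     addr = ''
--     for x in contents:
--         dig1 = x & 0x0f
--         dig2 = x >> 4
--         if dig1 != 0x0f:
--             addr = addr + '%x' % dig1
--         if dig2 != 0x0f:
--             addr = addr + '%x' % dig2
--     return addr
-- ===== SOURCE B (Python) =====
-- def _TBCDString(contents):
--     # Divide-and-conquer: split the byte list in half, decode each half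
--     # recursively, and concatenate; a singleton decodes its two nibbles
--     # (low first), dropping the 0xF filler.
--     if not contents:
--         return ''
--     if len(contents) == 1:
--         x, = contents
--         lo = x & 0x0f
--         hi = x >> 4
--         return ('' if lo == 0x0f else '%x' % lo) + ('' if hi == 0x0f else '%x' % hi)
--     mid = len(contents) // 2
--     return _TBCDString(contents[:mid]) + _TBCDString(contents[mid:])
-- ===== Notes on version B (the rewrite author's own statement) =====
-- stated objective: alternative
-- what changed: A's single left-to-right loop with conditional string appends is replaced by a divide-and-conquer recursion that splits the list in half, decodes each half independently and concatenates the results, with the per-byte nibble decoding only at singleton leaves.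
import Mathlib
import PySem

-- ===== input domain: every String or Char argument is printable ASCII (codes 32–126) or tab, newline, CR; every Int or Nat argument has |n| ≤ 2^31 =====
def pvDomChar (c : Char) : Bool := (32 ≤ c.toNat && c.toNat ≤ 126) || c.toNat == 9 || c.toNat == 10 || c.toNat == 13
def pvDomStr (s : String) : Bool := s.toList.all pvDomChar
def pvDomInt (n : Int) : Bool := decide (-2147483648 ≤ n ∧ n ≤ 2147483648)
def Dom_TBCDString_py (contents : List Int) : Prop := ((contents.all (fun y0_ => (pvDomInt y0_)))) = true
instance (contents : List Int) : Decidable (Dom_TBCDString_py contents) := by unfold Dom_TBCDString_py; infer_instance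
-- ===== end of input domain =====

-- B replaces A's single left-to-right accumulator loop by a divide-and-conquer
-- recursion (split in half, decode halves, concatenate); same value everywhere
-- (objective: alternative).

-- ===== PORT A =====
-- hand-written port of Python's '%x' % d (lowercase hex, '-' prefix for negatives,
-- "0" for zero) — exact on all ints; shared by both ports since both Pythons use '%x'
def pyHexDigit (n : Nat) : Char := if n < 10 then Char.ofNat (48 + n) else Char.ofNat (87 + n)

def natHexChars (n : Nat) : List Char :=
  if n = 0 then [] else natHexChars (n / 16) ++ [pyHexDigit (n % 16)]
decreasing_by exact Nat.div_lt_self (Nat.pos_of_ne_zero (by assumption)) (by norm_num)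

def pyHex (d : Int) : String :=
  if d < 0 then "-" ++ String.ofList (natHexChars d.natAbs)
  else if d = 0 then "0" else String.ofList (natHexChars d.natAbs)

def TBCDString_py (contents : List Int) : String :=
  contents.foldl
    (fun addr x =>
      let dig1 := PySem.Int.band x 15
      let dig2 := x >>> 4
      let addr := if dig1 ≠ 15 then addr ++ pyHex dig1 else addr
      if dig2 ≠ 15 then addr ++ pyHex dig2 else addr)
    ""

-- ===== PORT B =====
-- contents[:mid] / contents[mid:] with 0 ≤ mid ≤ len are exactly take/drop
def TBCDString_py_alt (contents : List Int) : String :=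
  match contents with
  | [] => ""
  | [x] =>
    let lo := PySem.Int.band x 15
    let hi := x >>> 4
    (if lo = 15 then "" else pyHex lo) ++ (if hi = 15 then "" else pyHex hi)
  | a :: b :: rest =>
    let mid := (a :: b :: rest).length / 2
    TBCDString_py_alt ((a :: b :: rest).take mid) ++ TBCDString_py_alt ((a :: b :: rest).drop mid)
termination_by contents.length
decreasing_by
  · simp [List.length_take]; omega
  · simp; omega

-- ===== PRECONDITION & SPEC =====
def Spec_TBCDString_py (contents : List Int) (out : String) : Prop := out = TBCDString_py_alt contents
instance (contents : List Int) (out : String) : Decidable (Spec_TBCDString_py contents out) := by unfold Spec_TBCDString_py; infer_instance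

-- ===== CLAIM =====
def Claim_equal_TBCDString_py : Prop := ∀ (contents : List Int), Dom_TBCDString_py contents → Spec_TBCDString_py contents (TBCDString_py contents)

-- ===== LEMMAS AND PROOFS =====

-- the per-element contribution both programs produce
def nibStr (x : Int) : String :=
  (if PySem.Int.band x 15 ≠ 15 then pyHex (PySem.Int.band x 15) else "")
  ++ (if x >>> 4 ≠ 15 then pyHex (x >>> 4) else "")

theorem foldl_str (l : List String) (s : String) :
    l.foldl (fun r t => r ++ t) s = s ++ l.foldl (fun r t => r ++ t) "" := by
  induction l generalizing s with
  | nil => simp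
  | cons t l ih =>
    simp only [List.foldl]
    rw [ih (s ++ t), ih ("" ++ t)]
    simp [String.append_assoc]

theorem join_nil : String.join ([] : List String) = "" := rfl

theorem join_cons (t : String) (l : List String) :
    String.join (t :: l) = t ++ String.join l := by
  show (t :: l).foldl (fun r s => r ++ s) "" = t ++ l.foldl (fun r s => r ++ s) ""
  simp only [List.foldl]
  rw [foldl_str]
  simp

theorem join_append (l1 l2 : List String) :
    String.join (l1 ++ l2) = String.join l1 ++ String.join l2 := by
  induction l1 with
  | nil => simp [join_nil]
  | cons t l ih => simp [join_cons, ih, String.append_assoc]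

theorem foldlA_eq (l : List Int) (s : String) :
    l.foldl
      (fun addr x =>
        let dig1 := PySem.Int.band x 15
        let dig2 := x >>> 4
        let addr := if dig1 ≠ 15 then addr ++ pyHex dig1 else addr
        if dig2 ≠ 15 then addr ++ pyHex dig2 else addr)
      s = s ++ String.join (l.map nibStr) := by
  induction l generalizing s with
  | nil => simp [join_nil]
  | cons x xs ih =>
    simp only [List.foldl, List.map_cons, join_cons, ih, nibStr]
    split_ifs <;> simp_all [String.append_assoc]

theorem altB_eq (l : List Int) : TBCDString_py_alt l = String.join (l.map nibStr) := by
  induction l using TBCDString_py_alt.induct with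
  | case1 => rw [TBCDString_py_alt]; rfl
  | case2 x =>
    simp only [TBCDString_py_alt, List.map_cons, List.map_nil, join_cons, join_nil, nibStr]
    split_ifs <;> simp_all
  | case3 a b rest mid ih1 ih2 =>
    rw [TBCDString_py_alt]
    rw [ih1, ih2, ← join_append, ← List.map_append, List.take_append_drop]

-- ===== VERDICT =====
theorem TBCDString_py_spec : Claim_equal_TBCDString_py := by
  intro contents _
  unfold Spec_TBCDString_py TBCDString_py
  rw [foldlA_eq, altB_eq]
  simp
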